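-- pv_equiv track=rewrite | github.com/Anithasadhanala/OOPSInPyn | is_bouncy_or_not.py | finding_bouncy
-- ===== SOURCE A (Python) =====
-- def finding_bouncy(n,data):
--     count_a=0
--     count_b=0
--     list_a=[]
--     for i in range(n):
--         if(i<=n-2):
--             if data[i]>data[i+1]:
--                 list_a.append(1)
--             elif data[i]==data[i+1]:
--                 list_a.append(8)
--             else:
--                 list_a.append(0)
--     if(data[n-1]>data[n-2]):
--         list_a.append(1)
--     elif data[n-1]==data[n-2]:
--         list_a.append(8)
--     else:
--         list_a.append(0)
--
--     if(8 not in list_a):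
--         if(list_a[0]==1):
--            for i in range(n):
--                if(i%2==0):
--                    if(list_a[i]!=1):
--                        return False
--                else:
--                    if(list_a[i]!=0):
--                        return False
--         elif(list_a[0]==0):
--             for i in range(n):
--                 if(i%2==0):
--                    if(list_a[i]!=0):
--                        return False
--                 else:
--                     if(list_a[i]!=1):
--                         return False
--         return True
--
--     return False
-- ===== SOURCE B (Python) =====
-- def _cmp(x, y):
--     return 1 if x > y else 8 if x == y else 0
--
-- def finding_bouncy(n, data):
--     codes = [_cmp(data[i], data[i + 1]) for i in range(max(n - 1, 0))]
--     codes.append(_cmp(data[n - 1], data[n - 2]))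
--     if 8 in codes:
--         return False
--     return all(a != b for a, b in zip(codes, codes[1:]))
-- ===== Notes on version B (the rewrite author's own statement) =====
-- stated objective: simpler
-- what changed: B keeps the comparison-code list construction but replaces A's branch on the first element with two parity-indexed verification loops by a single membership test for 8 plus one adjacent-pair alternation scan over zipped neighbours.
import Mathlib
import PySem

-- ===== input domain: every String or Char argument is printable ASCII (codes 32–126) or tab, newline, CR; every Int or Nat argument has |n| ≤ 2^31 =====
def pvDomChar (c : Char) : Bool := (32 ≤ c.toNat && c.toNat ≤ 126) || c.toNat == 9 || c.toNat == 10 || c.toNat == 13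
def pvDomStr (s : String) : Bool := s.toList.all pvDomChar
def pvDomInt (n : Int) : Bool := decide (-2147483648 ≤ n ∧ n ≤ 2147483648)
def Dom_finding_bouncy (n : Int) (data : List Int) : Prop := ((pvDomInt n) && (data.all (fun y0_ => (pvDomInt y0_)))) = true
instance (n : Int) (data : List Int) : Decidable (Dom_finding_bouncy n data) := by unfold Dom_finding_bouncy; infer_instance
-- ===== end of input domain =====

-- B keeps A's code-list construction but checks alternation by one adjacent-pair scan instead of
-- A's branch-on-first-element with two parity-indexed loops (objective: simpler; same cost).
-- data[i] under Pre_ is always in range (possibly negative, Python wraparound): pyGetD is exact there.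
def pvAt (l : List Int) (i : Int) : Int := PySem.List.pyGetD l i 0

-- ===== PORT A =====
def finding_bouncy (n : Int) (data : List Int) : Bool :=
  let list_a : List Int :=
    (PySem.List.pyRange 0 n 1).foldl (fun acc i =>
      if i ≤ n - 2 then
        acc ++ [if pvAt data i > pvAt data (i+1) then (1:Int)
                else if pvAt data i = pvAt data (i+1) then 8 else 0]
      else acc) []
  let list_a := list_a ++ [if pvAt data (n-1) > pvAt data (n-2) then (1:Int)
                           else if pvAt data (n-1) = pvAt data (n-2) then 8 else 0]
  if ¬ ((8:Int) ∈ list_a) then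
    if pvAt list_a 0 = 1 then
      (PySem.List.pyRange 0 n 1).all (fun i =>
        if PySem.Int.mod i 2 = 0 then pvAt list_a i == 1 else pvAt list_a i == 0)
    else if pvAt list_a 0 = 0 then
      (PySem.List.pyRange 0 n 1).all (fun i =>
        if PySem.Int.mod i 2 = 0 then pvAt list_a i == 0 else pvAt list_a i == 1)
    else true
  else false

-- ===== PORT B =====
def pvCmp (x y : Int) : Int := if x > y then 1 else if x = y then 8 else 0

def finding_bouncy_alt (n : Int) (data : List Int) : Bool :=
  let codes : List Int :=
    (PySem.List.pyRange 0 (max (n-1) 0) 1).map (fun i => pvCmp (pvAt data i) (pvAt data (i+1)))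
  let codes := codes ++ [pvCmp (pvAt data (n-1)) (pvAt data (n-2))]
  if (8:Int) ∈ codes then false
  else (codes.zip codes.tail).all (fun p => p.1 != p.2)

-- ===== PRECONDITION & SPEC =====
-- Pre_ excludes exactly the inputs on which the Python A raises IndexError (an index of the
-- build phase out of range, counting Python's negative-index wraparound); A returns on all others.
def Pre_finding_bouncy (n : Int) (data : List Int) : Prop :=
  (1 ≤ n ∧ n ≤ (data.length : Int)) ∨ (n ≤ 0 ∧ 2 - n ≤ (data.length : Int))
instance (n : Int) (data : List Int) : Decidable (Pre_finding_bouncy n data) := by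
  unfold Pre_finding_bouncy; infer_instance

def pvWitness_finding_bouncy : Int × List Int := (3, [1, 3, 2])

def Spec_finding_bouncy (n : Int) (data : List Int) (out : Bool) : Prop := out = finding_bouncy_alt n data
instance (n : Int) (data : List Int) (out : Bool) : Decidable (Spec_finding_bouncy n data out) := by unfold Spec_finding_bouncy; infer_instance

-- ===== CLAIM (what is proved, stated in full; the proofs are below) =====
def Claim_equal_finding_bouncy : Prop := ∀ (n : Int) (data : List Int), Dom_finding_bouncy n data → Pre_finding_bouncy n data → Spec_finding_bouncy n data (finding_bouncy n data)


-- ===== LEMMAS AND PROOFS =====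

lemma pvCmp_val (x y : Int) : pvCmp x y = 0 ∨ pvCmp x y = 1 ∨ pvCmp x y = 8 := by
  unfold pvCmp; split_ifs <;> simp

-- B's zipped adjacent-pair scan, in index form
lemma zipall_iff : ∀ (l : List Int),
    (((l.zip l.tail).all (fun p => p.1 != p.2)) = true ↔
      ∀ i, i + 1 < l.length → l.getD i 0 ≠ l.getD (i+1) 0)
  | [] => by simp
  | [x] => by simp
  | x :: y :: r => by
    have ih := zipall_iff (y :: r)
    simp only [List.zip_cons_cons, List.tail_cons, List.all_cons, Bool.and_eq_true,
      bne_iff_ne, ne_eq] at ih ⊢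
    rw [ih]
    constructor
    · rintro ⟨h1, h2⟩ i hi
      cases i with
      | zero => simpa using h1
      | succ k => simpa using h2 k (by simpa using hi)
    · intro h
      exact ⟨by simpa using h 0 (by simp),
        fun k hk => by simpa using h (k+1) (by simpa using hk)⟩

-- A's parity pattern check equals adjacent alternation on a 0/1 list
lemma patIff (l : List Int) (a : Int) (ha : a = 0 ∨ a = 1)
    (hvals : ∀ x ∈ l, x = 0 ∨ x = 1) (h0 : l.getD 0 0 = a) :
    ((∀ i < l.length, l.getD i 0 = if i % 2 = 0 then a else 1 - a) ↔
      ∀ i, i + 1 < l.length → l.getD i 0 ≠ l.getD (i+1) 0) := by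
  constructor
  · intro h i hi
    have h1 := h i (by omega)
    have h2 := h (i+1) hi
    rw [h1, h2]
    by_cases hp : i % 2 = 0
    · have h2p : (i+1) % 2 = 1 := by omega
      simp only [hp, if_true, h2p]
      omega
    · have hp1 : i % 2 = 1 := by omega
      have h2p : (i+1) % 2 = 0 := by omega
      simp only [hp, if_false, h2p, if_true]
      omega
  · intro h i hi
    induction i with
    | zero => simpa using h0
    | succ k ihk =>
      have hk := ihk (by omega)
      have hne := h k hi
      have hmem : l.getD (k+1) 0 = 0 ∨ l.getD (k+1) 0 = 1 := by
        rw [List.getD_eq_getElem l 0 hi]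
        exact hvals _ (List.getElem_mem hi)
      rw [hk] at hne
      by_cases hp : k % 2 = 0
      · have h2p : (k+1) % 2 ≠ 0 := by omega
        rw [if_pos hp] at hne
        rw [if_neg h2p]
        rcases hmem with hm | hm <;> omega
      · have h2p : (k+1) % 2 = 0 := by omega
        rw [if_neg hp] at hne
        rw [if_pos h2p]
        rcases hmem with hm | hm <;> omega

-- A's range-indexed all, in index form
lemma allA_iff (l : List Int) (n c1 c2 : Int) :
    (((PySem.List.pyRange 0 n 1).all (fun i =>
        if PySem.Int.mod i 2 = 0 then pvAt l i == c1 else pvAt l i == c2)) = true ↔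
      ∀ k < n.toNat, l.getD k 0 = if k % 2 = 0 then c1 else c2) := by
  rw [List.all_eq_true]
  constructor
  · intro h k hk
    have hmem : (k : Int) ∈ PySem.List.pyRange 0 n 1 := by
      rw [PySem.List.mem_pyRange_one]; omega
    have := h _ hmem
    rw [PySem.Int.mod_eq_emod_of_pos (by norm_num)] at this
    simp only [pvAt, PySem.List.pyGetD_natCast] at this
    by_cases hp : k % 2 = 0
    · have hc : ((k : Int)) % 2 = 0 := by omega
      rw [if_pos hc] at this
      rw [if_pos hp]
      exact beq_iff_eq.mp (by simpa using this)
    · have hc : ¬ ((k : Int)) % 2 = 0 := by omega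
      rw [if_neg hc] at this
      rw [if_neg hp]
      exact beq_iff_eq.mp (by simpa using this)
  · intro h i hi
    rw [PySem.List.mem_pyRange_one] at hi
    have hk := h i.toNat (by omega)
    rw [PySem.Int.mod_eq_emod_of_pos (by norm_num)]
    have hcast : i = ((i.toNat : Nat) : Int) := by omega
    rw [hcast]
    simp only [pvAt, PySem.List.pyGetD_natCast]
    by_cases hp : i.toNat % 2 = 0
    · have hc : (((i.toNat : Nat) : Int)) % 2 = 0 := by omega
      rw [if_pos hc, beq_iff_eq]
      rw [if_pos hp] at hk; exact hk
    · have hc : ¬ (((i.toNat : Nat) : Int)) % 2 = 0 := by omega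
      rw [if_neg hc, beq_iff_eq]
      rw [if_neg hp] at hk; exact hk

-- A's guarded foldl build equals B's map over the truncated range
lemma build_eq (n : Int) (data : List Int) :
    ((PySem.List.pyRange 0 n 1).foldl (fun acc i =>
      if i ≤ n - 2 then
        acc ++ [if pvAt data i > pvAt data (i+1) then (1:Int)
                else if pvAt data i = pvAt data (i+1) then 8 else 0]
      else acc) [])
    = (PySem.List.pyRange 0 (max (n-1) 0) 1).map
        (fun i => pvCmp (pvAt data i) (pvAt data (i+1))) := by
  have hfun : (fun (acc : List Int) (i : Int) =>
      if i ≤ n - 2 then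
        acc ++ [if pvAt data i > pvAt data (i+1) then (1:Int)
                else if pvAt data i = pvAt data (i+1) then 8 else 0]
      else acc)
    = (fun acc i =>
      if (decide (i ≤ n - 2)) = true then acc ++ [pvCmp (pvAt data i) (pvAt data (i+1))]
      else acc) := by
    funext acc i
    simp [pvCmp]
  rw [hfun, PySem.List.foldl_append_if, List.nil_append]
  by_cases hn : n ≤ 0
  · rw [PySem.List.pyRange_one_eq_nil hn, PySem.List.pyRange_one_eq_nil (by omega)]
    simp
  · have hmax : max (n-1) 0 = n - 1 := by omega
    rw [hmax, PySem.List.pyRange_one_append 0 (n-1) n (by omega) (by omega),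
      List.filter_append]
    have hsing : PySem.List.pyRange (n-1) n 1 = [n-1] := by
      have := PySem.List.pyRange_one_singleton (n-1)
      rwa [sub_add_cancel] at this
    rw [hsing]
    have h1 : (List.filter (fun i => decide (i ≤ n - 2)) [n-1]) = [] := by
      simp [show ¬ (n - 1 ≤ n - 2) from by omega]
    have h2 : (PySem.List.pyRange 0 (n-1) 1).filter (fun i => decide (i ≤ n - 2)) =
        PySem.List.pyRange 0 (n-1) 1 := by
      rw [List.filter_eq_self]
      intro a ha
      rw [PySem.List.mem_pyRange_one] at ha
      simp; omega
    rw [h1, h2, List.append_nil]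

-- ===== VERDICT (by name: the statement is the Claim_ definition above) =====
theorem finding_bouncy_spec : Claim_equal_finding_bouncy := by
  intro n data _ _
  unfold Spec_finding_bouncy finding_bouncy finding_bouncy_alt
  rw [build_eq]
  simp only [pvCmp]
  set c : Int := if pvAt data (n-1) > pvAt data (n-2) then (1:Int)
                 else if pvAt data (n-1) = pvAt data (n-2) then 8 else 0 with hc
  set l : List Int := (PySem.List.pyRange 0 (max (n-1) 0) 1).map
      (fun i => if pvAt data i > pvAt data (i+1) then (1:Int)
                else if pvAt data i = pvAt data (i+1) then 8 else 0) ++ [c] with hl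
  by_cases h8 : (8:Int) ∈ l
  · simp [h8]
  · rw [if_pos (by exact h8), if_neg h8]
    have hvals : ∀ x ∈ l, x = 0 ∨ x = 1 := by
      intro x hx
      have hx3 : x = 0 ∨ x = 1 ∨ x = 8 := by
        rw [hl] at hx
        rcases List.mem_append.mp hx with hx' | hx'
        · rcases List.mem_map.mp hx' with ⟨i, _, rfl⟩
          have := pvCmp_val (pvAt data i) (pvAt data (i+1))
          simpa [pvCmp] using this
        · have hxc : x = c := by simpa using hx'
          have := pvCmp_val (pvAt data (n-1)) (pvAt data (n-2))
          rw [hxc, hc]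
          simpa [pvCmp] using this
      rcases hx3 with h | h | h
      · exact Or.inl h
      · exact Or.inr h
      · exact absurd (h ▸ hx) h8
    by_cases hn : n ≤ 0
    · have hr : PySem.List.pyRange 0 n 1 = [] := PySem.List.pyRange_one_eq_nil hn
      have hr2 : PySem.List.pyRange 0 (max (n-1) 0) 1 = [] :=
        PySem.List.pyRange_one_eq_nil (by omega)
      rw [hl, hr2] at *
      simp [hr]
    · have hlen : l.length = n.toNat := by
        rw [hl]
        simp only [List.length_append, List.length_map, PySem.List.length_pyRange_one,
          List.length_cons, List.length_nil]
        omega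
      have h0 : pvAt l 0 = l.getD 0 0 := by
        simp [pvAt, PySem.List.pyGetD_zero]
      have hlne : l ≠ [] := by rw [hl]; simp
      have h0mem : l.getD 0 0 = 0 ∨ l.getD 0 0 = 1 := by
        cases hll : l with
        | nil => exact absurd hll hlne
        | cons z t =>
          rw [List.getD_cons_zero]
          exact hvals z (by rw [hll]; exact List.mem_cons_self)
      rw [h0]
      rcases h0mem with ha | ha
      · rw [if_neg (by rw [ha]; norm_num), if_pos ha]
        rw [Bool.eq_iff_iff, allA_iff, zipall_iff, ← hlen]
        have := patIff l 0 (Or.inl rfl) hvals ha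
        norm_num at this
        exact this
      · rw [if_pos ha]
        rw [Bool.eq_iff_iff, allA_iff, zipall_iff, ← hlen]
        have := patIff l 1 (Or.inr rfl) hvals ha
        norm_num at this
        exact this
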